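-- pv_equiv track=rewrite | github.com/tim-ings/wow-drp | main.py | iterate_pixels
-- ===== SOURCE A (Python) =====
-- def iterate_pixels(pixels, channel):
--     line = ""
--     wait_for_null = False
--
--     if channel.lower() == 'r':
--         channel_index = 0
--     elif channel.lower() == 'g':
--         channel_index = 1
--     elif channel.lower() == 'b':
--         channel_index = 2
--     else:
--         raise ValueError("Unknown color channel: {0}".format(channel))
--
--     for p in pixels:
--         channels = p
--         character_ordinal = channels[channel_index]
--         if character_ordinal == 0:
--             # We've reached a null separator; look for a character again
--             wait_for_null = False
--         elif wait_for_null is False: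
--             # Cool, this is a character. Due to UI Scale, this character may repeat immediately
--             # afterwards. Thus, wait for a null separator before continuing to parse.
--             line += chr(character_ordinal)
--             wait_for_null = True
--
--     return line
-- ===== SOURCE B (Python) =====
-- def iterate_pixels(pixels, channel):
--     try:
--         channel_index = {'r': 0, 'g': 1, 'b': 2}[channel.lower()]
--     except KeyError:
--         raise ValueError("Unknown color channel: {0}".format(channel))
--     vals = [p[channel_index] for p in pixels]
--     return ''.join(chr(v) for prev, v in zip([0] + vals, vals)
--                    if prev == 0 and v != 0)
-- ===== Notes on version B (the rewrite author's own statement) =====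
-- stated objective: idiomatic
-- what changed: Replaces the wait_for_null toggle state machine with a stateless pairwise scan: a character is emitted exactly at each nonzero channel value whose predecessor is zero (zip of the value list with itself shifted by one), then joined.
-- outside the precondition, e.g. on iterate_pixels([(1114112, 0, 0)], 'r'): A raises ValueError, B raises ValueError
import Mathlib
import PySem

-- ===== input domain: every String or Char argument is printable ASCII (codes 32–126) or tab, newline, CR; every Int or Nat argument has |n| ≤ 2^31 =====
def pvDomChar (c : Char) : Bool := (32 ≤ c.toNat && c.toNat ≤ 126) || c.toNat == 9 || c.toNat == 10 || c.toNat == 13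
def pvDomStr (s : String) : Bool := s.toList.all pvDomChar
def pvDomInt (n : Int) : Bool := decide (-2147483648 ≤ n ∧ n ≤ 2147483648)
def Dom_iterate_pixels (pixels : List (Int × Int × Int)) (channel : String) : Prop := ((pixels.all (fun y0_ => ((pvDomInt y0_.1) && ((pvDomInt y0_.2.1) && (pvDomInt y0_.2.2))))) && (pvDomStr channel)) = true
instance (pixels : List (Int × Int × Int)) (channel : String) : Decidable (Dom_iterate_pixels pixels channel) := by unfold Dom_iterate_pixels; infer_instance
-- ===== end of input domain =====

-- B replaces A's wait_for_null toggle state machine with a stateless pairwise scan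
-- (emit chr(v) exactly where v != 0 and the previous channel value is 0); idiomatic, same cost.


-- shared tiny helper: Python's p[channel_index] on a 3-tuple (channel_index ∈ {0,1,2} under Pre_)
def pvChanSel (ci : Int) (p : Int × Int × Int) : Int :=
  if ci = 0 then p.1 else if ci = 1 then p.2.1 else p.2.2

-- ===== PORT A =====
-- the final 'else' of the if/elif chain raises ValueError in Python: excluded by Pre_, junk index 0 here
def iterate_pixels (pixels : List (Int × Int × Int)) (channel : String) : String :=
  let lc := PySem.Str.lower channel
  let channel_index : Int := if lc = "r" then 0 else if lc = "g" then 1 else if lc = "b" then 2 else 0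
  let step := fun (st : List Char × Bool) (p : Int × Int × Int) =>
    let character_ordinal := pvChanSel channel_index p
    if character_ordinal = 0 then (st.1, false)
    else if st.2 = false then (st.1 ++ [Char.ofNat character_ordinal.toNat], true)
    else st
  String.ofList (pixels.foldl step ([], false)).1

-- ===== PORT B =====
-- the 'none' branch raises ValueError in Python (re-raised KeyError): excluded by Pre_
def iterate_pixels_alt (pixels : List (Int × Int × Int)) (channel : String) : String :=
  match PySem.Dict.get? (PySem.Dict.mk [("r", (0 : Int)), ("g", 1), ("b", 2)]) (PySem.Str.lower channel) with
  | none => ""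
  | some channel_index =>
    let vals := pixels.map (pvChanSel channel_index)
    String.ofList ((List.zip (0 :: vals) vals).filterMap
      (fun pv => if pv.1 = 0 ∧ pv.2 ≠ 0 then some (Char.ofNat pv.2.toNat) else none))

-- ===== PRECONDITION & SPEC =====
-- Pre_ excludes: (a) channels other than r/g/b (case-insensitive), where A raises ValueError;
-- (b) inputs where some emitted code (a nonzero channel value following a zero, or leading) is
-- outside chr's range [0, 0x10FFFF], where A raises ValueError; and (c) emitted surrogate codes
-- 0xD800–0xDFFF, where A returns a lone-surrogate string not representable as a Lean String.
def Pre_iterate_pixels (pixels : List (Int × Int × Int)) (channel : String) : Prop :=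
  (PySem.Str.lower channel = "r" ∨ PySem.Str.lower channel = "g" ∨ PySem.Str.lower channel = "b") ∧
  (let ci : Int := if PySem.Str.lower channel = "r" then 0 else if PySem.Str.lower channel = "g" then 1 else 2
   let vals := pixels.map (pvChanSel ci)
   ∀ pv ∈ List.zip (0 :: vals) vals, pv.1 = 0 → pv.2 ≠ 0 →
     0 ≤ pv.2 ∧ pv.2 ≤ 1114111 ∧ ¬(55296 ≤ pv.2 ∧ pv.2 ≤ 57343))
instance (pixels : List (Int × Int × Int)) (channel : String) : Decidable (Pre_iterate_pixels pixels channel) := by unfold Pre_iterate_pixels; infer_instance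

def pvWitness_iterate_pixels : (List (Int × Int × Int)) × String := ([(104, 0, 0), (0, 0, 0), (105, 0, 0)], "r")

def Spec_iterate_pixels (pixels : List (Int × Int × Int)) (channel : String) (out : String) : Prop := out = iterate_pixels_alt pixels channel
instance (pixels : List (Int × Int × Int)) (channel : String) (out : String) : Decidable (Spec_iterate_pixels pixels channel out) := by unfold Spec_iterate_pixels; infer_instance

-- ===== CLAIM (what is proved, stated in full; the proofs are below) =====
def Claim_equal_iterate_pixels : Prop := ∀ (pixels : List (Int × Int × Int)) (channel : String), Dom_iterate_pixels pixels channel → Pre_iterate_pixels pixels channel → Spec_iterate_pixels pixels channel (iterate_pixels pixels channel)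

-- ===== LEMMAS AND PROOFS =====

-- A's loop body, on the already-selected channel value
def pvStepV (st : List Char × Bool) (v : Int) : List Char × Bool :=
  if v = 0 then (st.1, false)
  else if st.2 = false then (st.1 ++ [Char.ofNat v.toNat], true)
  else st

def pvEmit (pv : Int × Int) : Option Char :=
  if pv.1 = 0 ∧ pv.2 ≠ 0 then some (Char.ofNat pv.2.toNat) else none

-- core invariant: A's fold state (acc, wait) with wait = (prev ≠ 0) computes B's pairwise scan
theorem pv_core (vals : List Int) (acc : List Char) (prev : Int) :
    (vals.foldl pvStepV (acc, decide (¬ prev = 0))).1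
      = acc ++ (List.zip (prev :: vals) vals).filterMap pvEmit := by
  induction vals generalizing acc prev with
  | nil => simp
  | cons v rest ih =>
    by_cases hv : v = 0
    · have h1 : pvStepV (acc, decide (¬ prev = 0)) v = (acc, false) := by
        simp [pvStepV, hv]
      have ih0 := ih acc 0
      norm_num at ih0
      simp only [List.foldl_cons, h1, ih0]
      simp [List.zip, pvEmit, hv]
    · by_cases hp : prev = 0
      · have h1 : pvStepV (acc, decide (¬ prev = 0)) v
            = (acc ++ [Char.ofNat v.toNat], true) := by
          simp [pvStepV, hv, hp]
        have ihv := ih (acc ++ [Char.ofNat v.toNat]) v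
        simp only [hv, not_false_iff, decide_true] at ihv
        simp only [List.foldl_cons, h1, ihv]
        simp [List.zip, pvEmit, hv, hp]
      · have h1 : pvStepV (acc, decide (¬ prev = 0)) v = (acc, true) := by
          simp [pvStepV, hv, hp]
        have ihv := ih acc v
        simp only [hv, not_false_iff, decide_true] at ihv
        simp only [List.foldl_cons, h1, ihv]
        simp [List.zip, pvEmit, hv, hp]

-- the two ports agree once the channel index ci is fixed
theorem pv_ports_eq (pixels : List (Int × Int × Int)) (ci : Int) :
    String.ofList (pixels.foldl
        (fun (st : List Char × Bool) (p : Int × Int × Int) =>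
          let character_ordinal := pvChanSel ci p
          if character_ordinal = 0 then (st.1, false)
          else if st.2 = false then (st.1 ++ [Char.ofNat character_ordinal.toNat], true)
          else st) ([], false)).1
      = String.ofList ((List.zip ((0 : Int) :: pixels.map (pvChanSel ci)) (pixels.map (pvChanSel ci))).filterMap
          (fun pv => if pv.1 = 0 ∧ pv.2 ≠ 0 then some (Char.ofNat pv.2.toNat) else none)) := by
  have hfold : pixels.foldl
      (fun (st : List Char × Bool) (p : Int × Int × Int) =>
        let character_ordinal := pvChanSel ci p
        if character_ordinal = 0 then (st.1, false)
        else if st.2 = false then (st.1 ++ [Char.ofNat character_ordinal.toNat], true)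
        else st) ([], false)
      = (pixels.map (pvChanSel ci)).foldl pvStepV ([], false) := by
    rw [List.foldl_map]
    rfl
  rw [hfold]
  have h0 : (false : Bool) = decide (¬ (0:Int) = 0) := by decide
  have := pv_core (pixels.map (pvChanSel ci)) [] 0
  rw [h0]
  rw [this]
  rfl

-- ===== VERDICT (by name: the statement is the Claim_ definition above) =====
theorem iterate_pixels_spec : Claim_equal_iterate_pixels := by
  intro pixels channel _hd hpre
  unfold Spec_iterate_pixels
  obtain ⟨hch, -⟩ := hpre
  rcases hch with h | h | h <;>
    simp only [iterate_pixels, iterate_pixels_alt, h] <;>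
    · simp only [PySem.Dict.get?_mk_cons]
      norm_num
      exact pv_ports_eq pixels _
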